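-- pv_equiv track=rewrite | github.com/Acreast/leetcode | 1790-CheckifOneStringSwapCanMakeStringsEqual/1790-CheckifOneStringSwapCanMakeStringsEqual.py | areAlmostEqual
-- ===== SOURCE A (Python) =====
-- def areAlmostEqual(s1: str, s2: str) -> bool:
--     first_diff_index = None
--     second_diff_index = None
--     diff_count = 0
--     if len(s1) != len(s2):
--         return False
--
--     for i in range(len(s1)):
--         if s1[i] != s2[i]:
--             diff_count += 1
--             if first_diff_index == None:
--                 first_diff_index = i
--             else:
--                 second_diff_index = i
--
--     if diff_count == 0:
--         return True
--     if diff_count > 2 or diff_count == 1: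
--         return False
--     return s1[first_diff_index] == s2[second_diff_index] and s1[second_diff_index] == s2[first_diff_index]
-- ===== SOURCE B (Python) =====
-- def areAlmostEqual(s1: str, s2: str) -> bool:
--     if len(s1) != len(s2):
--         return False
--     diffs = [(a, b) for a, b in zip(s1, s2) if a != b]
--     if not diffs:
--         return True
--     if len(diffs) != 2:
--         return False
--     return sorted(s1) == sorted(s2)
-- ===== Notes on version B (the rewrite author's own statement) =====
-- stated objective: idiomatic
-- what changed: Replaces the index-tracking loop (first/second mismatch indexes, cross-character check) with a zip comprehension collecting mismatched pairs and, when there are exactly two mismatches, a sorted(s1) == sorted(s2) multiset-equality test.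
import Mathlib
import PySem

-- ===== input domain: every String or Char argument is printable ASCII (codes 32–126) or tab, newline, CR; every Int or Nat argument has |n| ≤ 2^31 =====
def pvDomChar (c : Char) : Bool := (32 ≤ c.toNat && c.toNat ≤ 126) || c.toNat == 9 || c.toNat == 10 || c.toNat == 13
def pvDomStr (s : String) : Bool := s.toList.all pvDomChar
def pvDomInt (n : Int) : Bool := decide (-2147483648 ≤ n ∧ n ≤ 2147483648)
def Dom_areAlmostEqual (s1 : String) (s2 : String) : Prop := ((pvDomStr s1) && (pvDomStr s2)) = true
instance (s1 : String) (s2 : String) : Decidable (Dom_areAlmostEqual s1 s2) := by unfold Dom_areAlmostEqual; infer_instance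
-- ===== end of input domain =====

-- B replaces A's index-tracking loop (first/second mismatch indexes + cross-character check)
-- with a zip comprehension of mismatched pairs and a sorted(s1) == sorted(s2) multiset test
-- when there are exactly two mismatches (objective: idiomatic; not faster).

-- ===== PORT A =====
def areAlmostEqual (s1 : String) (s2 : String) : Bool :=
  if PySem.Str.len s1 ≠ PySem.Str.len s2 then false
  else
    -- the loop state (first_diff_index, second_diff_index, diff_count)
    let st := (PySem.List.pyRange 0 (PySem.Str.len s1) 1).foldl
      (fun (st : Option Int × Option Int × Int) i =>
        if PySem.Str.pyGet? s1 i ≠ PySem.Str.pyGet? s2 i then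
          match st.1 with
          | none => (some i, st.2.1, st.2.2 + 1)
          | some _ => (st.1, some i, st.2.2 + 1)
        else st)
      (none, none, 0)
    if st.2.2 = 0 then true
    else if st.2.2 > 2 ∨ st.2.2 = 1 then false
    else
      -- s1[first_diff_index] == s2[second_diff_index] and s1[second_diff_index] == s2[first_diff_index];
      -- when diff_count == 2 both indexes are some, so the catch-all branch is unreachable
      match st.1, st.2.1 with
      | some i, some j =>
          decide (PySem.Str.pyGet? s1 i = PySem.Str.pyGet? s2 j ∧
                  PySem.Str.pyGet? s1 j = PySem.Str.pyGet? s2 i)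
      | _, _ => false

-- ===== PORT B =====
def areAlmostEqual_alt (s1 : String) (s2 : String) : Bool :=
  if PySem.Str.len s1 ≠ PySem.Str.len s2 then false
  else
    let diffs := (s1.toList.zip s2.toList).filter (fun p => decide (p.1 ≠ p.2))
    if diffs.isEmpty then true
    else if diffs.length ≠ 2 then false
    else decide (PySem.List.sorted s1.toList (fun x => x) false
                 = PySem.List.sorted s2.toList (fun x => x) false)

-- ===== PRECONDITION & SPEC =====
def Spec_areAlmostEqual (s1 : String) (s2 : String) (out : Bool) : Prop := out = areAlmostEqual_alt s1 s2
instance (s1 : String) (s2 : String) (out : Bool) : Decidable (Spec_areAlmostEqual s1 s2 out) := by unfold Spec_areAlmostEqual; infer_instance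

-- ===== CLAIM (what is proved, stated in full; the proofs are below) =====
def Claim_equal_areAlmostEqual : Prop := ∀ (s1 : String) (s2 : String), Dom_areAlmostEqual s1 s2 → Spec_areAlmostEqual s1 s2 (areAlmostEqual s1 s2)

-- ===== LEMMAS AND PROOFS =====

-- the mismatched positions of a zipped list, with their indexes
def pvMism (L : List (Char × Char)) : List (Int × Char × Char) :=
  (PySem.List.enumerate L 0).filter (fun p => decide (p.2.1 ≠ p.2.2))

-- A's loop state as a function of the mismatch list
def pvStOf (E : List (Int × Char × Char)) : Option Int × Option Int × Int :=
  (E.head?.map (·.1), (if 2 ≤ E.length then E.getLast?.map (·.1) else none), (E.length : Int))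

lemma pvMism_append_singleton (M : List (Char × Char)) (p : Char × Char) :
    pvMism (M ++ [p]) =
      pvMism M ++ (if p.1 ≠ p.2 then [((M.length : Int), p)] else []) := by
  unfold pvMism
  rw [PySem.List.enumerate_append, List.filter_append]
  by_cases hp : p.1 = p.2 <;>
    simp [PySem.List.enumerate_cons, PySem.List.enumerate_nil, hp]

lemma pvMism_snd (L : List (Char × Char)) :
    (pvMism L).map (·.2) = L.filter (fun p => decide (p.1 ≠ p.2)) := by
  unfold pvMism
  induction L using List.reverseRecOn with
  | nil => rfl
  | append_singleton M p ih =>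
      rw [PySem.List.enumerate_append, List.filter_append, List.map_append,
        List.filter_append, ih]
      by_cases hp : p.1 = p.2 <;>
        simp [PySem.List.enumerate_cons, PySem.List.enumerate_nil, hp]

lemma pvFoldTake (s1 s2 : String) (h : s1.toList.length = s2.toList.length)
    (k : Nat) (hk : k ≤ s1.toList.length) :
    ((PySem.List.pyRange 0 (k : Int) 1).foldl
      (fun (st : Option Int × Option Int × Int) i =>
        if PySem.Str.pyGet? s1 i ≠ PySem.Str.pyGet? s2 i then
          match st.1 with
          | none => (some i, st.2.1, st.2.2 + 1)
          | some _ => (st.1, some i, st.2.2 + 1)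
        else st)
      (none, none, 0))
    = pvStOf (pvMism ((s1.toList.zip s2.toList).take k)) := by
  induction k with
  | zero =>
      rw [show ((0 : Nat) : Int) = 0 by norm_num,
        PySem.List.pyRange_one_eq_nil (by omega)]
      simp [pvStOf, pvMism, PySem.List.enumerate_nil]
  | succ k ih =>
      have hk' : k ≤ s1.toList.length := by omega
      have hks : k < s1.toList.length := by omega
      have hkz : k < (s1.toList.zip s2.toList).length := by
        rw [List.length_zip]; omega
      rw [show ((k + 1 : Nat) : Int) = (k : Int) + 1 by push_cast; ring,
        PySem.List.pyRange_one_succ_right (by omega), List.foldl_append, ih hk']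
      have htake : (s1.toList.zip s2.toList).take (k + 1)
          = (s1.toList.zip s2.toList).take k ++ [(s1.toList.zip s2.toList)[k]] := by
        rw [List.take_add_one, List.getElem?_eq_getElem hkz]
        rfl
      have hzk : (s1.toList.zip s2.toList)[k] = (s1.toList[k], s2.toList[k]'(by omega)) :=
        List.getElem_zip
      have hlen_take : ((s1.toList.zip s2.toList).take k).length = k := by
        rw [List.length_take]; omega
      rw [htake, pvMism_append_singleton, hlen_take]
      have hg1 : PySem.Str.pyGet? s1 (k : Int) = some (s1.toList[k]) := by
        rw [PySem.Str.pyGet?_natCast, List.getElem?_eq_getElem hks]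
      have hg2 : PySem.Str.pyGet? s2 (k : Int) = some (s2.toList[k]'(by omega)) := by
        rw [PySem.Str.pyGet?_natCast, List.getElem?_eq_getElem (by omega : k < s2.toList.length)]
      simp only [List.foldl_cons, List.foldl_nil, hg1, hg2, hzk]
      by_cases hne : s1.toList[k] = s2.toList[k]'(by omega)
      · simp [hne]
      · simp only [ne_eq, hne, not_false_iff, if_pos, Option.some.injEq]
        cases hE : pvMism ((s1.toList.zip s2.toList).take k) with
        | nil =>
            simp [pvStOf]
        | cons e E' =>
            have h2 : 2 ≤ E'.length + 1 + 1 := by omega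
            simp [pvStOf, h2]
            exact ⟨s1.toList[k], s2.toList[k], by
              rw [← List.cons_append, List.getLast?_concat]⟩
  
lemma pvFoldEq (s1 s2 : String) (h : s1.toList.length = s2.toList.length) :
    ((PySem.List.pyRange 0 (PySem.Str.len s1) 1).foldl
      (fun (st : Option Int × Option Int × Int) i =>
        if PySem.Str.pyGet? s1 i ≠ PySem.Str.pyGet? s2 i then
          match st.1 with
          | none => (some i, st.2.1, st.2.2 + 1)
          | some _ => (st.1, some i, st.2.2 + 1)
        else st)
      (none, none, 0))
    = pvStOf (pvMism (s1.toList.zip s2.toList)) := by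
  have hlen : PySem.Str.len s1 = ((s1.toList.length : Nat) : Int) := by
    simp [PySem.Str.len_eq]
  have htake : (s1.toList.zip s2.toList).take s1.toList.length
      = s1.toList.zip s2.toList := by
    apply List.take_of_length_le
    rw [List.length_zip]; omega
  rw [hlen, pvFoldTake s1 s2 h s1.toList.length (le_refl _), htake]

-- counting identity: each side's count plus the other side's mismatched chars agree
lemma pvCount (xs ys : List Char) (h : xs.length = ys.length) (c : Char) :
    xs.count c + ((xs.zip ys).filter (fun p => decide (p.1 ≠ p.2))).countP
        (fun p => decide (p.2 = c))
    = ys.count c + ((xs.zip ys).filter (fun p => decide (p.1 ≠ p.2))).countP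
        (fun p => decide (p.1 = c)) := by
  induction xs generalizing ys with
  | nil =>
      cases ys with
      | nil => rfl
      | cons y ys => simp at h
  | cons x xs ih =>
      cases ys with
      | nil => simp at h
      | cons y ys =>
          have h' : xs.length = ys.length := by simpa using h
          have hrec := ih ys h'
          simp only [ne_eq, decide_not] at hrec ⊢
          simp only [List.zip_cons_cons, List.filter_cons, List.count_cons]
          by_cases hxy : x = y
          · subst hxy
            rw [if_neg (show ¬ ((!decide (x = x)) = true) by simp)]
            simp only [beq_iff_eq]
            split_ifs <;> omega
          · rw [if_pos (show (!decide (x = y)) = true by simp [hxy])]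
            simp only [List.countP_cons, beq_iff_eq, decide_eq_true_eq]
            split_ifs <;> omega

lemma pvSwapIff (xs ys : List Char) (h : xs.length = ys.length)
    (a1 b1 a2 b2 : Char)
    (hD : (xs.zip ys).filter (fun p => decide (p.1 ≠ p.2)) = [(a1, b1), (a2, b2)])
    (h1 : a1 ≠ b1) (h2 : a2 ≠ b2) :
    xs.Perm ys ↔ (a1 = b2 ∧ a2 = b1) := by
  have hcnt : ∀ c : Char,
      xs.count c + ((if b2 = c then 1 else 0) + (if b1 = c then 1 else 0))
      = ys.count c + ((if a2 = c then 1 else 0) + (if a1 = c then 1 else 0)) := by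
    intro c
    have hc := pvCount xs ys h c
    rw [hD] at hc
    simpa [List.countP_cons] using hc
  rw [List.perm_iff_count]
  constructor
  · intro H
    have e1 := hcnt a1
    have e2 := hcnt a2
    rw [H a1] at e1
    rw [H a2] at e2
    have hb1a1 : b1 ≠ a1 := fun hh => h1 hh.symm
    have hb2a1 : b2 = a1 := by
      by_contra hq
      rw [if_neg hq, if_neg hb1a1, if_pos (show a1 = a1 from rfl)] at e1
      split_ifs at e1 <;> omega
    have ha2a1 : a2 ≠ a1 := by
      intro hh
      rw [if_pos hb2a1, if_neg hb1a1, if_pos hh, if_pos (show a1 = a1 from rfl)] at e1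
      omega
    have hb2a2 : b2 ≠ a2 := by rw [hb2a1]; exact fun hh => ha2a1 hh.symm
    have ha1a2 : a1 ≠ a2 := fun hh => ha2a1 hh.symm
    have hb1a2 : b1 = a2 := by
      by_contra hq
      rw [if_neg hb2a2, if_neg hq, if_pos (show a2 = a2 from rfl), if_neg ha1a2] at e2
      omega
    exact ⟨hb2a1.symm, hb1a2.symm⟩
  · rintro ⟨hb2, hb1⟩ c
    have hc := hcnt c
    subst hb2
    subst hb1
    split_ifs at hc <;> omega

-- membership in the mismatch list pins down the chars at that index
lemma pvMism_mem (s1 s2 : String) (h : s1.toList.length = s2.toList.length)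
    (e : Int × Char × Char) (he : e ∈ pvMism (s1.toList.zip s2.toList)) :
    PySem.Str.pyGet? s1 e.1 = some e.2.1 ∧ PySem.Str.pyGet? s2 e.1 = some e.2.2 := by
  have hm : e ∈ PySem.List.enumerate (s1.toList.zip s2.toList) 0 :=
    List.mem_of_mem_filter he
  rw [PySem.List.mem_enumerate_iff] at hm
  obtain ⟨k, hk, hek⟩ := hm
  have hkz := hk
  rw [List.length_zip] at hkz
  have hk1 : k < s1.toList.length := by omega
  have hk2 : k < s2.toList.length := by omega
  have hz : (s1.toList.zip s2.toList)[k] = (s1.toList[k], s2.toList[k]) :=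
    List.getElem_zip
  subst hek
  simp only [hz, zero_add]
  constructor
  · rw [PySem.Str.pyGet?_natCast, List.getElem?_eq_getElem hk1]
  · rw [PySem.Str.pyGet?_natCast, List.getElem?_eq_getElem hk2]

-- mismatched pairs really are mismatched
lemma pvMism_ne (L : List (Char × Char)) (e : Int × Char × Char)
    (he : e ∈ pvMism L) : e.2.1 ≠ e.2.2 := by
  have := List.of_mem_filter he
  simpa using this

-- ===== VERDICT (by name: the statement is the Claim_ definition above) =====
theorem areAlmostEqual_spec : Claim_equal_areAlmostEqual := by
  intro s1 s2 _
  unfold Spec_areAlmostEqual areAlmostEqual areAlmostEqual_alt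
  by_cases hlen : PySem.Str.len s1 = PySem.Str.len s2
  · have hno : ¬ (PySem.Str.len s1 ≠ PySem.Str.len s2) := fun hh => hh hlen
    rw [if_neg hno, if_neg hno]
    have h : s1.toList.length = s2.toList.length := by
      have hl := hlen
      simp [PySem.Str.len_eq] at hl
      exact_mod_cast hl
    rw [pvFoldEq s1 s2 h]
    have hmap := pvMism_snd (s1.toList.zip s2.toList)
    cases hE : pvMism (s1.toList.zip s2.toList) with
    | nil =>
        rw [hE] at hmap
        have hfil : (s1.toList.zip s2.toList).filter (fun p => decide (p.1 ≠ p.2)) = [] :=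
          hmap.symm
        rw [hfil]
        simp [pvStOf]
    | cons e1 E1 =>
        rw [hE] at hmap
        cases E1 with
        | nil =>
            -- one mismatch: both sides return false
            have hfil : (s1.toList.zip s2.toList).filter (fun p => decide (p.1 ≠ p.2))
                = [e1.2] := by rw [← hmap]; rfl
            rw [hfil]
            norm_num [pvStOf]
        | cons e2 E2 =>
            cases E2 with
            | nil =>
                -- exactly two mismatches
                have hfil : (s1.toList.zip s2.toList).filter (fun p => decide (p.1 ≠ p.2))
                    = [(e1.2.1, e1.2.2), (e2.2.1, e2.2.2)] := by rw [← hmap]; rfl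
                rw [hfil]
                have hme1 : e1 ∈ pvMism (s1.toList.zip s2.toList) := by rw [hE]; simp
                have hme2 : e2 ∈ pvMism (s1.toList.zip s2.toList) := by rw [hE]; simp
                obtain ⟨hg11, hg12⟩ := pvMism_mem s1 s2 h e1 hme1
                obtain ⟨hg21, hg22⟩ := pvMism_mem s1 s2 h e2 hme2
                have hne1 := pvMism_ne _ e1 hme1
                have hne2 := pvMism_ne _ e2 hme2
                have hiff := pvSwapIff s1.toList s2.toList h e1.2.1 e1.2.2 e2.2.1 e2.2.2
                  hfil hne1 hne2
                have hsort := PySem.List.sorted_id_eq_sorted_id_iff_perm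
                  (xs := s1.toList) (ys := s2.toList)
                simp only [PySem.Str.pyGet?, PySem.Chars.pyGet?] at hg11 hg12 hg21 hg22
                norm_num [pvStOf]
                simp only [hg11, hg12, hg21, hg22, Option.some.injEq]
                rw [← Bool.decide_and]
                apply decide_eq_decide.mpr
                rw [hsort, hiff]
            | cons e3 E3 =>
                -- three or more mismatches: both sides return false
                have hfil : (s1.toList.zip s2.toList).filter (fun p => decide (p.1 ≠ p.2))
                    = e1.2 :: e2.2 :: e3.2 :: E3.map (·.2) := by rw [← hmap]; rfl
                rw [hfil]
                have hc0 : ¬ ((pvStOf (e1 :: e2 :: e3 :: E3)).2.2 = 0) := by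
                  simp only [pvStOf, List.length_cons]
                  push_cast
                  omega
                have hc2 : (pvStOf (e1 :: e2 :: e3 :: E3)).2.2 > 2 := by
                  simp only [pvStOf, List.length_cons]
                  push_cast
                  omega
                rw [if_neg hc0, if_pos (Or.inl hc2)]
                have hb1 : ¬ ((e1.2 :: e2.2 :: e3.2 :: E3.map (·.2)).isEmpty = true) := by
                  simp
                have hb2 : (e1.2 :: e2.2 :: e3.2 :: E3.map (·.2)).length ≠ 2 := by
                  simp
                rw [if_neg hb1, if_pos hb2]
  · have hyes : PySem.Str.len s1 ≠ PySem.Str.len s2 := hlen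
    rw [if_pos hyes, if_pos hyes]
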